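-- pv_equiv track=rewrite | github.com/CHoNChmonich/- | laba10.py | f
-- ===== SOURCE A (Python) =====
-- def f(x):
--     c=0
--     while(x>0):
--         x=x//10
--         c+=1
--     if(c==2):
--         return True
--     return False
-- ===== SOURCE B (Python) =====
-- def f(x):
--     return 10 <= x < 100
-- ===== Notes on version B (the rewrite author's own statement) =====
-- stated objective: simpler
-- what changed: Replaced the digit-counting while-loop with the closed-form range test 10 <= x < 100, which holds exactly when x has two digits.
import Mathlib
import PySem

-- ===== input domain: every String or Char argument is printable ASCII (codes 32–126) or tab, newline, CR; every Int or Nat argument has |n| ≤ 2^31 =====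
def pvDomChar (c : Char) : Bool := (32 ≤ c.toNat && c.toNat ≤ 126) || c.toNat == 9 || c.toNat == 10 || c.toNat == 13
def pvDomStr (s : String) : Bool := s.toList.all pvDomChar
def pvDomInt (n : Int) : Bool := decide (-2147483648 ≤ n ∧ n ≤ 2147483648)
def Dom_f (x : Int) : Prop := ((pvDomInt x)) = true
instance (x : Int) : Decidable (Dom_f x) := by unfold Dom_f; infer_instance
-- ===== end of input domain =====

-- B replaces A's digit-counting loop with the closed-form range test 10 <= x < 100 (simpler).
-- ===== PORT A =====
def fLoop (x : Int) (c : Int) : Int :=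
  if _h : x > 0 then fLoop (PySem.Int.floordiv x 10) (c + 1) else c
termination_by x.toNat
decreasing_by
  have h10 : PySem.Int.floordiv x 10 = x / 10 := PySem.Int.floordiv_eq_ediv_of_pos (by omega)
  rw [h10]; omega

def f (x : Int) : Bool :=
  let c := fLoop x 0
  if c = 2 then true else false

-- ===== PORT B =====
def f_alt (x : Int) : Bool := decide (10 ≤ x ∧ x < 100)

-- ===== PRECONDITION & SPEC =====
def Spec_f (x : Int) (out : Bool) : Prop := out = f_alt x
instance (x : Int) (out : Bool) : Decidable (Spec_f x out) := by unfold Spec_f; infer_instance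

-- ===== CLAIM (what is proved, stated in full; the proofs are below) =====
def Claim_equal_f : Prop := ∀ (x : Int), Dom_f x → Spec_f x (f x)

-- ===== LEMMAS AND PROOFS =====

-- ===== VERDICT (by name: the statement is the Claim_ definition above) =====
theorem fLoop_ge (x c : Int) : c ≤ fLoop x c := by
  unfold fLoop
  split
  · rename_i h
    have h10 : PySem.Int.floordiv x 10 = x / 10 := PySem.Int.floordiv_eq_ediv_of_pos (by omega)
    have := fLoop_ge (PySem.Int.floordiv x 10) (c + 1)
    omega
  · omega
termination_by x.toNat
decreasing_by
  rw [PySem.Int.floordiv_eq_ediv_of_pos (by omega : (0:Int) < 10)]; omega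

theorem fLoop_eq (x c : Int) (h : x ≤ 0) : fLoop x c = c := by
  unfold fLoop; split <;> omega

theorem f_spec : Claim_equal_f := by
  intro x _
  unfold Spec_f f f_alt
  have hd : ∀ y : Int, 0 < y → PySem.Int.floordiv y 10 = y / 10 := fun y _ =>
    PySem.Int.floordiv_eq_ediv_of_pos (by omega)
  by_cases h0 : x ≤ 0
  · simp [fLoop_eq x 0 h0]; omega
  · push_neg at h0
    by_cases h9 : x ≤ 9
    · rw [fLoop]
      simp only [show x > 0 from h0, dite_true, hd x h0]
      rw [fLoop_eq _ _ (by omega)]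
      simp; omega
    · push_neg at h9
      by_cases h99 : x ≤ 99
      · have hx : 1 ≤ x / 10 ∧ x / 10 ≤ 9 := by omega
        rw [fLoop]
        simp only [show x > 0 from h0, dite_true, hd x h0]
        rw [fLoop]
        simp only [show x / 10 > 0 from by omega, dite_true, hd (x/10) (by omega)]
        rw [fLoop_eq _ _ (by omega)]
        simp; omega
      · push_neg at h99
        have h1 : 10 ≤ x / 10 := by omega
        have h2 : 1 ≤ x / 10 / 10 := by omega
        rw [fLoop]
        simp only [show x > 0 from h0, dite_true, hd x h0]
        rw [fLoop]
        simp only [show x / 10 > 0 from by omega, dite_true, hd (x/10) (by omega)]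
        rw [fLoop]
        simp only [show x / 10 / 10 > 0 from by omega, dite_true, hd (x/10/10) (by omega)]
        have := fLoop_ge (x / 10 / 10 / 10) 3
        have hne : fLoop (x / 10 / 10 / 10) 3 ≠ 2 := by omega
        simp [hne]; omega
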